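-- pv_equiv track=rewrite | github.com/pypi-data/pypi-mirror-343 | packages/taskinator/taskinator-0.1.3.tar.gz/taskinator-0.1.3/taskinator/task_manager.py | _parse_variations
-- ===== SOURCE A (Python) =====
-- def _parse_variations(lines):
--     """Parse variations from content lines.
--
--     Args:
--         lines: List of content lines
--
--     Returns:
--         List of variation dictionaries
--     """
--     variations = []
--     current_variation = None
--     variation_description = []
--
--     for line in lines:
--         if line.strip().startswith('### '):
--             # Save previous variation if exists
--             if current_variation:
--                 variations.append({
--                     'name': current_variation,
--                     'description': '\n'.join(variation_description).strip()
--                 })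
--
--             # Start new variation
--             current_variation = line.strip()[4:]
--             variation_description = []
--         elif current_variation:
--             variation_description.append(line)
--
--     # Add the last variation
--     if current_variation:
--         variations.append({
--             'name': current_variation,
--             'description': '\n'.join(variation_description).strip()
--         })
--
--     return variations
-- ===== SOURCE B (Python) =====
-- def _is_header(line):
--     return line.strip().startswith('### ')
--
--
-- def _drop_until_header(lines):
--     """Drop leading lines up to (not including) the first header line."""
--     k = 0
--     while k < len(lines) and not _is_header(lines[k]):
--         k += 1
--     return lines[k:]
--
--
-- def _span_non_header(lines):
--     """Split lines into (maximal non-header prefix, remainder)."""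
--     k = 0
--     while k < len(lines) and not _is_header(lines[k]):
--         k += 1
--     return lines[:k], lines[k:]
--
--
-- def _parse_variations(lines):
--     """Parse variations from content lines.
--
--     Args:
--         lines: List of content lines
--
--     Returns:
--         List of variation dictionaries
--     """
--     rest = _drop_until_header(lines)
--     if not rest:
--         return []
--     head = rest[0]
--     body, tail = _span_non_header(rest[1:])
--     return [{'name': head.strip()[4:],
--              'description': '\n'.join(body).strip()}] + _parse_variations(tail)
-- ===== Notes on version B (the rewrite author's own statement) =====
-- stated objective: alternative
-- what changed: Replaces A's single flush-on-header accumulator loop (current name + pending description list + final flush) with a recursive section-splitting decomposition: skip to the first header, span off the non-header body, emit the group, recurse on the remainder.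
import Mathlib
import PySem

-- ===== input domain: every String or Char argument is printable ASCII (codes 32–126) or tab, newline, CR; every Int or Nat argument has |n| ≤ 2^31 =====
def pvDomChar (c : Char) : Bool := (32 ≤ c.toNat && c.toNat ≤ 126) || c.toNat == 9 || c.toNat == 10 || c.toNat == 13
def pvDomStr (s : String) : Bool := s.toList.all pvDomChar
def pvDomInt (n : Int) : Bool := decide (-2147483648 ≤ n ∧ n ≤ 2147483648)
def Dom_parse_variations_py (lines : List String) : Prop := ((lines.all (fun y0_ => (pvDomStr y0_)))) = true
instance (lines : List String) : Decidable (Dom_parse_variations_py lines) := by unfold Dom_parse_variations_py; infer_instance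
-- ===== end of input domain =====

-- B replaces A's flush-on-header accumulator loop by a recursive section-splitting
-- decomposition (skip to header, span the body, emit, recurse); same cost, return value only.

-- ===== PORT A =====
-- fold state: (variations, current_variation, variation_description)
def pvAStep (st : List (List (String × String)) × Option String × List String)
    (line : String) : List (List (String × String)) × Option String × List String :=
  if PySem.Str.startswith (PySem.Str.strip line) "### " then
    let vars :=
      match st.2.1 with
      | some cv =>
          if cv = "" then st.1
          else st.1 ++ [[("name", cv),
                         ("description", PySem.Str.strip (PySem.Str.join "\n" st.2.2))]]
      | none => st.1
    (vars, some (PySem.Str.slice (PySem.Str.strip line) (some 4) none), [])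
  else
    match st.2.1 with
    | some cv =>
        if cv = "" then st
        else (st.1, st.2.1, st.2.2 ++ [line])
    | none => st

def parse_variations_py (lines : List String) : List (List (String × String)) :=
  let st := lines.foldl pvAStep ([], none, [])
  match st.2.1 with
  | some cv =>
      if cv = "" then st.1
      else st.1 ++ [[("name", cv),
                     ("description", PySem.Str.strip (PySem.Str.join "\n" st.2.2))]]
  | none => st.1

-- ===== PORT B =====
def pvIsHeader (line : String) : Bool :=
  PySem.Str.startswith (PySem.Str.strip line) "### "

-- while-loop of _drop_until_header, as structural recursion
def pvDropUntilHeader : List String → List String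
  | [] => []
  | l :: ls => if pvIsHeader l then l :: ls else pvDropUntilHeader ls

-- while-loop of _span_non_header, as structural recursion
def pvSpanNonHeader : List String → List String × List String
  | [] => ([], [])
  | l :: ls =>
      if pvIsHeader l then ([], l :: ls)
      else
        let p := pvSpanNonHeader ls
        (l :: p.1, p.2)

-- termination facts for parse_variations_py_alt
theorem pvDropUntilHeader_length_le (ls : List String) :
    (pvDropUntilHeader ls).length ≤ ls.length := by
  induction ls with
  | nil => simp [pvDropUntilHeader]
  | cons l ls ih =>
      simp only [pvDropUntilHeader]
      split
      · simp
      · exact Nat.le_trans ih (Nat.le_succ _)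

theorem pvSpanNonHeader_snd_length_le (ls : List String) :
    (pvSpanNonHeader ls).2.length ≤ ls.length := by
  induction ls with
  | nil => simp [pvSpanNonHeader]
  | cons l ls ih =>
      simp only [pvSpanNonHeader]
      split
      · simp
      · exact Nat.le_trans ih (Nat.le_succ _)

def parse_variations_py_alt (lines : List String) : List (List (String × String)) :=
  match h : pvDropUntilHeader lines with
  | [] => []
  | head :: restTail =>
      let p := pvSpanNonHeader restTail
      [("name", PySem.Str.slice (PySem.Str.strip head) (some 4) none),
       ("description", PySem.Str.strip (PySem.Str.join "\n" p.1))] ::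
        parse_variations_py_alt p.2
  termination_by lines.length
  decreasing_by
    have h1 := pvSpanNonHeader_snd_length_le restTail
    have h2 := pvDropUntilHeader_length_le lines
    simp only [h, List.length_cons] at h2
    omega

-- ===== PRECONDITION & SPEC =====
def Spec_parse_variations_py (lines : List String) (out : List (List (String × String))) : Prop := out = parse_variations_py_alt lines
instance (lines : List String) (out : List (List (String × String))) : Decidable (Spec_parse_variations_py lines out) := by unfold Spec_parse_variations_py; infer_instance

-- ===== CLAIM (what is proved, stated in full; the proofs are below) =====
def Claim_equal_parse_variations_py : Prop := ∀ (lines : List String), Dom_parse_variations_py lines → Spec_parse_variations_py lines (parse_variations_py lines)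

-- ===== LEMMAS AND PROOFS =====

-- A's final flush, as a function of the fold state
def pvFinalize (st : List (List (String × String)) × Option String × List String) :
    List (List (String × String)) :=
  match st.2.1 with
  | some cv =>
      if cv = "" then st.1
      else st.1 ++ [[("name", cv),
                     ("description", PySem.Str.strip (PySem.Str.join "\n" st.2.2))]]
  | none => st.1

theorem parse_variations_py_eq_finalize (lines : List String) :
    parse_variations_py lines = pvFinalize (lines.foldl pvAStep ([], none, [])) := rfl

-- the name cut out of a header line
def pvName (line : String) : String :=
  PySem.Str.slice (PySem.Str.strip line) (some 4) none

-- one emitted variation dict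
def pvEntry (cv : String) (desc : List String) : List (String × String) :=
  [("name", cv), ("description", PySem.Str.strip (PySem.Str.join "\n" desc))]

-- unfolding equations for parse_variations_py_alt
theorem pvAlt_of_drop_nil (lines : List String)
    (h : pvDropUntilHeader lines = []) : parse_variations_py_alt lines = [] := by
  rw [parse_variations_py_alt]
  split
  · rfl
  · next heq => rw [h] at heq; cases heq

theorem pvAlt_of_drop_cons (lines : List String) (hd : String) (r : List String)
    (h : pvDropUntilHeader lines = hd :: r) :
    parse_variations_py_alt lines =
      pvEntry (pvName hd) (pvSpanNonHeader r).1 ::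
        parse_variations_py_alt (pvSpanNonHeader r).2 := by
  rw [parse_variations_py_alt]
  split
  · next heq => rw [h] at heq; cases heq
  · next head restTail heq =>
      rw [h] at heq
      injection heq with h1 h2
      subst h1; subst h2
      simp [pvEntry, pvName]

-- a header line's name is never empty: strip leaves no trailing space, so the
-- stripped line is strictly longer than the prefix "### "
theorem pvName_ne_empty (line : String) (h : pvIsHeader line = true) :
    pvName line ≠ "" := by
  intro hname
  rw [pvIsHeader] at h
  rw [pvName] at hname
  replace hname := congrArg String.toList hname
  simp [pysem] at h hname
  obtain ⟨s, hs⟩ := h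
  have hs0 : s = [] := by
    have := congrArg List.length hs
    simp at this
    have hl0 : s.length = 0 := by omega
    exact List.eq_nil_of_length_eq_zero hl0
  subst hs0
  have hteq : PySem.Chars.strip line.toList = ['#', '#', '#', ' '] := by
    rw [← hs]; simp
  have hrev : List.dropWhile PySem.Chars.isspace
      (PySem.Chars.lstrip line.toList).reverse = [' ', '#', '#', '#'] := by
    have := congrArg List.reverse hteq
    simp only [PySem.Chars.strip, PySem.Chars.rstrip, List.reverse_reverse] at this
    rw [this]; rfl
  have hne : List.dropWhile PySem.Chars.isspace
      (PySem.Chars.lstrip line.toList).reverse ≠ [] := by rw [hrev]; simp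
  have hhead := List.head_dropWhile_not (p := PySem.Chars.isspace)
    (l := (PySem.Chars.lstrip line.toList).reverse) hne
  have hsp : (List.dropWhile PySem.Chars.isspace
      (PySem.Chars.lstrip line.toList).reverse).head hne = ' ' := by
    simp [hrev]
  rw [hsp] at hhead
  exact absurd hhead (by decide)

-- the line pvDropUntilHeader stops at is a header
theorem pvDropUntilHeader_head (ls : List String) (h r : _)
    (heq : pvDropUntilHeader ls = h :: r) : pvIsHeader h = true := by
  induction ls with
  | nil => simp [pvDropUntilHeader] at heq
  | cons l t ih =>
      by_cases hl : pvIsHeader l = true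
      · simp [pvDropUntilHeader, hl] at heq
        rwa [← heq.1]
      · simp [pvDropUntilHeader, hl] at heq
        exact ih heq

-- the line pvSpanNonHeader stops at is a header
theorem pvSpanNonHeader_snd_head (ls : List String) (h r : _)
    (heq : (pvSpanNonHeader ls).2 = h :: r) : pvIsHeader h = true := by
  induction ls with
  | nil => simp [pvSpanNonHeader] at heq
  | cons l t ih =>
      by_cases hl : pvIsHeader l = true
      · simp [pvSpanNonHeader, hl] at heq
        rwa [← heq.1]
      · simp [pvSpanNonHeader, hl] at heq
        exact ih heq

-- L1: folding from the "no current variation" state skips to the first header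
theorem pvFoldl_none (ls : List String) (acc : List (List (String × String)))
    (d : List String) :
    ls.foldl pvAStep (acc, none, d) =
      (match pvDropUntilHeader ls with
       | [] => (acc, (none : Option String), d)
       | h :: r => r.foldl pvAStep (acc, some (pvName h), [])) := by
  induction ls with
  | nil => simp [pvDropUntilHeader]
  | cons l t ih =>
      by_cases hl : pvIsHeader l = true
      · have : pvAStep (acc, none, d) l = (acc, some (pvName l), []) := by
          simp [pvAStep, pvIsHeader, pvName] at hl ⊢
          simp [hl]
        simp [pvDropUntilHeader, hl, List.foldl_cons, this]
      · have : pvAStep (acc, none, d) l = (acc, none, d) := by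
          simp [pvIsHeader] at hl
          simp [pvAStep, hl]
        simp [pvDropUntilHeader, hl, List.foldl_cons, this, ih]

-- L2: folding with a live (nonempty) current variation absorbs the non-header span
-- into the pending description
theorem pvFoldl_some (ls : List String) (acc : List (List (String × String)))
    (cv : String) (d : List String) (hcv : cv ≠ "") :
    ls.foldl pvAStep (acc, some cv, d) =
      (pvSpanNonHeader ls).2.foldl pvAStep (acc, some cv, d ++ (pvSpanNonHeader ls).1) := by
  induction ls generalizing d with
  | nil => simp [pvSpanNonHeader]
  | cons l t ih =>
      by_cases hl : pvIsHeader l = true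
      · simp [pvSpanNonHeader, hl]
      · have hstep : pvAStep (acc, some cv, d) l = (acc, some cv, d ++ [l]) := by
          simp [pvIsHeader] at hl
          simp [pvAStep, hl, hcv]
        simp only [pvSpanNonHeader, hl, List.foldl_cons, hstep]
        rw [ih (d ++ [l])]
        simp

-- L4: finalize after folding from a live variation produces that group, the span's
-- group boundaries, and B's recursion on the remainder
theorem pvFinalize_foldl_some (n : Nat) :
    ∀ (ls : List String), ls.length ≤ n →
    ∀ (acc : List (List (String × String))) (cv : String), cv ≠ "" →
    pvFinalize (ls.foldl pvAStep (acc, some cv, [])) =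
      acc ++ pvEntry cv (pvSpanNonHeader ls).1 :: parse_variations_py_alt (pvSpanNonHeader ls).2 := by
  induction n with
  | zero =>
      intro ls hlen acc cv hcv
      have : ls = [] := List.length_eq_zero_iff.mp (Nat.le_zero.mp hlen)
      subst this
      simp [pvSpanNonHeader, pvFinalize, hcv, pvEntry, parse_variations_py_alt,
        pvDropUntilHeader]
  | succ n ih =>
      intro ls hlen acc cv hcv
      rw [pvFoldl_some ls acc cv [] hcv]
      cases hsnd : (pvSpanNonHeader ls).2 with
      | nil =>
          have halt : parse_variations_py_alt ([] : List String) = [] :=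
            pvAlt_of_drop_nil [] rfl
          simp [pvFinalize, hcv, pvEntry, halt]
      | cons h r =>
          have hh : pvIsHeader h = true := pvSpanNonHeader_snd_head ls h r hsnd
          have hstep : pvAStep (acc, some cv, [] ++ (pvSpanNonHeader ls).1) h =
              (acc ++ [pvEntry cv (pvSpanNonHeader ls).1], some (pvName h), []) := by
            have hcond : PySem.Str.startswith (PySem.Str.strip h) "### " = true := hh
            simp only [pvAStep, hcond, pvEntry, pvName]
            simp [hcv]
          have hrlen : r.length ≤ n := by
            have h1 := pvSpanNonHeader_snd_length_le ls
            rw [hsnd] at h1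
            simp at h1
            omega
          have hname : pvName h ≠ "" := pvName_ne_empty h hh
          rw [List.foldl_cons, hstep, ih r hrlen _ _ hname]
          have halt : parse_variations_py_alt (h :: r) =
              pvEntry (pvName h) (pvSpanNonHeader r).1 ::
                parse_variations_py_alt (pvSpanNonHeader r).2 := by
            apply pvAlt_of_drop_cons
            simp [pvDropUntilHeader, hh]
          rw [halt]
          simp

theorem pvMain (lines : List String) :
    parse_variations_py lines = parse_variations_py_alt lines := by
  rw [parse_variations_py_eq_finalize, pvFoldl_none lines [] []]
  cases hdu : pvDropUntilHeader lines with
  | nil => rw [pvAlt_of_drop_nil lines hdu]; rfl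
  | cons h r =>
      have hh : pvIsHeader h = true := pvDropUntilHeader_head lines h r hdu
      have hname : pvName h ≠ "" := pvName_ne_empty h hh
      rw [pvFinalize_foldl_some r.length r (Nat.le_refl _) [] (pvName h) hname,
        pvAlt_of_drop_cons lines h r hdu]
      simp

-- ===== VERDICT (by name: the statement is the Claim_ definition above) =====
theorem parse_variations_py_spec : Claim_equal_parse_variations_py := by
  intro lines _
  unfold Spec_parse_variations_py
  exact pvMain lines
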